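-- pv_equiv track=rewrite | github.com/pliniogoncalves/PPD-Projeto-RMI-RPC | game_logic.py | existe_captura_possivel
-- ===== SOURCE A (Python) =====
-- TABULEIRO_TAMANHO = 5
--
-- def eh_casa_central(linha, coluna):
--     meio = TABULEIRO_TAMANHO // 2
--     return linha == meio and coluna == meio
--
-- def eh_movimento_valido(tabuleiro, linha_origem, coluna_origem, linha_destino, coluna_destino, jogador_atual):
--     if tabuleiro[linha_origem][coluna_origem] != jogador_atual:
--         return False
--     if tabuleiro[linha_destino][coluna_destino] != 0:
--         return False
--     if not ((linha_origem == linha_destino and abs(coluna_origem - coluna_destino) == 1) or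
--             (coluna_origem == coluna_destino and abs(linha_origem - linha_destino) == 1)):
--         return False
--     return True
--
-- def realizar_movimento(tabuleiro, linha_origem, coluna_origem, linha_destino, coluna_destino):
--     jogador = tabuleiro[linha_origem][coluna_origem]
--     tabuleiro[linha_destino][coluna_destino] = jogador
--     tabuleiro[linha_origem][coluna_origem] = 0
--
-- def verificar_e_realizar_capturas(tabuleiro, linha, coluna, jogador_atual):
--     capturou = False
--     for dl, dc in [(-1, 0), (1, 0), (0, -1), (0, 1)]:
--         l_adj = linha + dl
--         c_adj = coluna + dc
--         l_oposto = linha + 2 * dl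
--         c_oposto = coluna + 2 * dc
--         if 0 <= l_adj < TABULEIRO_TAMANHO and 0 <= c_adj < TABULEIRO_TAMANHO and \
--            0 <= l_oposto < TABULEIRO_TAMANHO and 0 <= c_oposto < TABULEIRO_TAMANHO:
--             if tabuleiro[l_adj][c_adj] != 0 and tabuleiro[l_adj][c_adj] != jogador_atual and \
--                tabuleiro[l_oposto][c_oposto] == jogador_atual:
--
--                 if eh_casa_central(l_adj, c_adj):
--                     continue
--
--                 tabuleiro[l_adj][c_adj] = 0
--                 capturou = True
--     return capturou
--
-- def existe_captura_possivel(tabuleiro, jogador_atual):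
--     for linha in range(TABULEIRO_TAMANHO):
--         for coluna in range(TABULEIRO_TAMANHO):
--             if tabuleiro[linha][coluna] == jogador_atual:
--                 for dl, dc in [(-1, 0), (1, 0), (0, -1), (0, 1)]:
--                     l_dest = linha + dl
--                     c_dest = coluna + dc
--                     if 0 <= l_dest < TABULEIRO_TAMANHO and 0 <= c_dest < TABULEIRO_TAMANHO:
--                         if eh_movimento_valido(tabuleiro, linha, coluna, l_dest, c_dest, jogador_atual):
--                             copia = [r[:] for r in tabuleiro]
--                             realizar_movimento(copia, linha, coluna, l_dest, c_dest)
--                             # Verifica se houve captura após o movimento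
--                             temp = [r[:] for r in copia]
--                             verificar_e_realizar_capturas(copia, l_dest, c_dest, jogador_atual)
--                             if copia != temp:  # Compara com estado pós-movimento
--                                 return True
--     return False
-- ===== SOURCE B (Python) =====
-- TABULEIRO_TAMANHO = 5
--
-- def existe_captura_possivel(tabuleiro, jogador_atual):
--     n = TABULEIRO_TAMANHO
--     meio = n // 2
--     dirs = ((-1, 0), (1, 0), (0, -1), (0, 1))
--     for r in range(n):
--         for c in range(n):
--             if tabuleiro[r][c] != jogador_atual:
--                 continue
--             for dl, dc in dirs:
--                 rd, cd = r + dl, c + dc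
--                 if not (0 <= rd < n and 0 <= cd < n) or tabuleiro[rd][cd] != 0:
--                     continue
--                 # test the capture sandwich directly on the original board:
--                 # the vacated origin can only appear as 'adjacent' (holding
--                 # jogador_atual, which fails the enemy test exactly as the
--                 # vacated 0 would), never as 'opposite'.
--                 for el, ec in dirs:
--                     ra, ca = rd + el, cd + ec
--                     ro, co = rd + 2 * el, cd + 2 * ec
--                     if 0 <= ro < n and 0 <= co < n and not (ra == meio and ca == meio):
--                         v = tabuleiro[ra][ca]
--                         if v != 0 and v != jogador_atual and tabuleiro[ro][co] == jogador_atual: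
--                             return True
--     return False
-- ===== Notes on version B (the rewrite author's own statement) =====
-- stated objective: simpler
-- what changed: B tests the capture sandwich directly on the original board (adjacent=dest+e is a non-central enemy and opposite=dest+2e holds the player) instead of copying the board twice, performing the move, running the mutating capture routine and comparing the boards.
import Mathlib
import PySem

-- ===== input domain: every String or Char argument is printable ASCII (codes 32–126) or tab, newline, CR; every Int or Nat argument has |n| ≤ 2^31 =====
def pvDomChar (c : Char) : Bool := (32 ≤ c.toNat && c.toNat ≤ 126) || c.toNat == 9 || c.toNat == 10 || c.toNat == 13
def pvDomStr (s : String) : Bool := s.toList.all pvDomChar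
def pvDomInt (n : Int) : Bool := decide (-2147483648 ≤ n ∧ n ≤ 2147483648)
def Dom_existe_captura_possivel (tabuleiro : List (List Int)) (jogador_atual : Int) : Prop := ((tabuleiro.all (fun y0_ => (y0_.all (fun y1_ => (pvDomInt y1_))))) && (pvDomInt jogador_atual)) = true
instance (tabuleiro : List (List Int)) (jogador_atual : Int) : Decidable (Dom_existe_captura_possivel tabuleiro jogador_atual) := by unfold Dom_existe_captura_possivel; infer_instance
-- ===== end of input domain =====

-- B replaces A's copy-move-mutate-compare capture test by a direct sandwich test on the
-- original board: simpler, no board copies or comparisons.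


-- ===== PORT A =====

def pvCell (t : List (List Int)) (r c : Int) : Int :=
  PySem.List.pyGetD (PySem.List.pyGetD t r []) c 0

def pvSetCell (t : List (List Int)) (r c : Int) (v : Int) : List (List Int) :=
  PySem.List.pySetD t r (PySem.List.pySetD (PySem.List.pyGetD t r []) c v)

def eh_casa_central (linha coluna : Int) : Bool :=
  let meio := PySem.Int.floordiv 5 2
  linha == meio && coluna == meio

def eh_movimento_valido (tab : List (List Int)) (linha_origem coluna_origem linha_destino coluna_destino jogador_atual : Int) : Bool :=
  if pvCell tab linha_origem coluna_origem != jogador_atual then false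
  else if pvCell tab linha_destino coluna_destino != 0 then false
  else if !((linha_origem == linha_destino && decide ((coluna_origem - coluna_destino).natAbs = 1)) ||
            (coluna_origem == coluna_destino && decide ((linha_origem - linha_destino).natAbs = 1))) then false
  else true

def realizar_movimento (tab : List (List Int)) (linha_origem coluna_origem linha_destino coluna_destino : Int) : List (List Int) :=
  let jogador := pvCell tab linha_origem coluna_origem
  let t1 := pvSetCell tab linha_destino coluna_destino jogador
  pvSetCell t1 linha_origem coluna_origem 0

def pvDirs : List (Int × Int) := [(-1, 0), (1, 0), (0, -1), (0, 1)]

def verificar_e_realizar_capturas (tab0 : List (List Int)) (linha coluna jogador_atual : Int) : Bool × List (List Int) :=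
  pvDirs.foldl (fun st d =>
    let l_adj := linha + d.1
    let c_adj := coluna + d.2
    let l_oposto := linha + 2 * d.1
    let c_oposto := coluna + 2 * d.2
    if 0 ≤ l_adj ∧ l_adj < 5 ∧ 0 ≤ c_adj ∧ c_adj < 5 ∧ 0 ≤ l_oposto ∧ l_oposto < 5 ∧ 0 ≤ c_oposto ∧ c_oposto < 5 then
      if pvCell st.2 l_adj c_adj != 0 && pvCell st.2 l_adj c_adj != jogador_atual &&
         pvCell st.2 l_oposto c_oposto == jogador_atual then
        if eh_casa_central l_adj c_adj then st
        else (true, pvSetCell st.2 l_adj c_adj 0)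
      else st
    else st) (false, tab0)

def existe_captura_possivel (tabuleiro : List (List Int)) (jogador_atual : Int) : Bool :=
  (PySem.List.pyRange 0 5 1).any fun linha =>
    (PySem.List.pyRange 0 5 1).any fun coluna =>
      if pvCell tabuleiro linha coluna == jogador_atual then
        pvDirs.any fun d =>
          let l_dest := linha + d.1
          let c_dest := coluna + d.2
          if 0 ≤ l_dest ∧ l_dest < 5 ∧ 0 ≤ c_dest ∧ c_dest < 5 then
            if eh_movimento_valido tabuleiro linha coluna l_dest c_dest jogador_atual then
              let copia := realizar_movimento tabuleiro linha coluna l_dest c_dest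
              let temp := copia
              decide ((verificar_e_realizar_capturas copia l_dest c_dest jogador_atual).2 ≠ temp)
            else false
          else false
      else false

-- ===== PORT B =====

def existe_captura_possivel_alt (tabuleiro : List (List Int)) (jogador_atual : Int) : Bool :=
  let meio := PySem.Int.floordiv 5 2
  (PySem.List.pyRange 0 5 1).any fun r =>
    (PySem.List.pyRange 0 5 1).any fun c =>
      pvCell tabuleiro r c == jogador_atual &&
      pvDirs.any fun d =>
        let rd := r + d.1
        let cd := c + d.2
        (decide (0 ≤ rd ∧ rd < 5 ∧ 0 ≤ cd ∧ cd < 5) && pvCell tabuleiro rd cd == 0) &&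
        pvDirs.any fun e =>
          let ra := rd + e.1
          let ca := cd + e.2
          let ro := rd + 2 * e.1
          let co := cd + 2 * e.2
          decide (0 ≤ ro ∧ ro < 5 ∧ 0 ≤ co ∧ co < 5) && !(ra == meio && ca == meio) &&
          (pvCell tabuleiro ra ca != 0 && pvCell tabuleiro ra ca != jogador_atual &&
           pvCell tabuleiro ro co == jogador_atual)

-- ===== PRECONDITION & SPEC =====
-- Pre_ excludes boards lacking 5 rows of at least 5 cells each: on those A raises IndexError,
-- except in the rare case a capture is found before the first out-of-range access (cited in claim.json).
def Pre_existe_captura_possivel (tabuleiro : List (List Int)) (jogador_atual : Int) : Prop :=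
  5 ≤ tabuleiro.length ∧ ∀ i : Nat, i < 5 → 5 ≤ (tabuleiro.getD i []).length

instance (tabuleiro : List (List Int)) (jogador_atual : Int) : Decidable (Pre_existe_captura_possivel tabuleiro jogador_atual) := by
  unfold Pre_existe_captura_possivel; infer_instance

def pvWitness_existe_captura_possivel : List (List Int) × Int :=
  ([[0, 0, 0, 0, 0], [0, 0, 0, 0, 0], [0, 0, 0, 0, 0], [0, 0, 0, 0, 0], [0, 0, 0, 0, 0]], 1)

def Spec_existe_captura_possivel (tabuleiro : List (List Int)) (jogador_atual : Int) (out : Bool) : Prop := out = existe_captura_possivel_alt tabuleiro jogador_atual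
instance (tabuleiro : List (List Int)) (jogador_atual : Int) (out : Bool) : Decidable (Spec_existe_captura_possivel tabuleiro jogador_atual out) := by unfold Spec_existe_captura_possivel; infer_instance

-- ===== CLAIM (what is proved, stated in full; the proofs are below) =====
def Claim_equal_existe_captura_possivel : Prop := ∀ (tabuleiro : List (List Int)) (jogador_atual : Int), Dom_existe_captura_possivel tabuleiro jogador_atual → Pre_existe_captura_possivel tabuleiro jogador_atual → Spec_existe_captura_possivel tabuleiro jogador_atual (existe_captura_possivel tabuleiro jogador_atual)

-- ===== LEMMAS AND PROOFS =====

lemma getD_set_row {α : Type} [Inhabited α] (t : List α) (a i : Nat) (w : α) (d : α) (ha : a < t.length) :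
    (t.set a w).getD i d = if a = i then w else t.getD i d := by
  rw [List.getD_eq_getElem?_getD, List.getD_eq_getElem?_getD, List.getElem?_set]
  by_cases h1 : a = i
  · subst h1; simp [ha]
  · simp [h1]

lemma pvCell_eq (t : List (List Int)) (x y : Int) (hx0 : 0 ≤ x) (hy0 : 0 ≤ y)
    (hx : (x:Int) < t.length) (hy : (y:Int) < (t.getD x.toNat []).length) :
    pvCell t x y = (t.getD x.toNat []).getD y.toNat 0 := by
  unfold pvCell
  have hx' : x.toNat < t.length := by omega
  rw [PySem.List.pyGetD_eq_getElem t [] hx0 (by omega)]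
  rw [← List.getD_eq_getElem t [] hx']
  have hy' : y.toNat < (t.getD x.toNat []).length := by omega
  rw [PySem.List.pyGetD_eq_getElem _ (0:Int) hy0 (by omega)]
  rw [← List.getD_eq_getElem _ 0 hy']

lemma pvSetCell_eq (t : List (List Int)) (r c : Int) (v : Int) (hr0 : 0 ≤ r) (hc0 : 0 ≤ c)
    (hr : (r:Int) < t.length) :
    pvSetCell t r c v = t.set r.toNat ((t.getD r.toNat []).set c.toNat v) := by
  unfold pvSetCell
  rw [PySem.List.pySetD_of_nonneg _ _ hr0, PySem.List.pySetD_of_nonneg _ _ hc0]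
  rw [PySem.List.pyGetD_eq_getElem t [] hr0 (by omega)]
  rw [← List.getD_eq_getElem t [] (by omega)]

lemma pvCell_pvSetCell (t : List (List Int)) (hT : 5 ≤ t.length)
    (hR : ∀ i : Nat, i < 5 → 5 ≤ (t.getD i []).length)
    (r c x y v : Int)
    (hr0 : 0 ≤ r) (hr5 : r < 5) (hc0 : 0 ≤ c) (hc5 : c < 5)
    (hx0 : 0 ≤ x) (hx5 : x < 5) (hy0 : 0 ≤ y) (hy5 : y < 5) :
    pvCell (pvSetCell t r c v) x y = if x = r ∧ y = c then v else pvCell t x y := by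
  have hrt : r.toNat < t.length := by omega
  have hxt : x.toNat < t.length := by omega
  have hxr5 : 5 ≤ (t.getD x.toNat []).length := hR x.toNat (by omega)
  have hrr5 : 5 ≤ (t.getD r.toNat []).length := hR r.toNat (by omega)
  rw [pvSetCell_eq t r c v hr0 hc0 (by omega)]
  rw [pvCell_eq _ x y hx0 hy0 (by simp [List.length_set]; omega)
      (by rw [getD_set_row _ _ _ _ _ hrt]
          by_cases h : r.toNat = x.toNat
          · rw [if_pos h, List.length_set]; omega
          · rw [if_neg h]; omega)]
  rw [pvCell_eq t x y hx0 hy0 (by omega) (by omega)]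
  rw [getD_set_row _ _ _ _ _ hrt]
  by_cases hxr : x = r
  · subst hxr
    rw [if_pos (by omega)]
    rw [getD_set_row _ _ _ _ _ (by omega)]
    by_cases hyc : y = c
    · subst hyc
      rw [if_pos (by omega)]
      simp
    · rw [if_neg (by omega)]
      simp [hyc]
  · rw [if_neg (by omega)]
    simp [hxr]

lemma pvSetCell_len (t : List (List Int)) (r c v : Int) (hr0 : 0 ≤ r) (hc0 : 0 ≤ c)
    (hr : (r:Int) < t.length) :
    (pvSetCell t r c v).length = t.length := by
  rw [pvSetCell_eq t r c v hr0 hc0 hr]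
  simp

lemma pvSetCell_rows (t : List (List Int)) (hT : 5 ≤ t.length)
    (hR : ∀ i : Nat, i < 5 → 5 ≤ (t.getD i []).length)
    (r c v : Int) (hr0 : 0 ≤ r) (hr5 : r < 5) (hc0 : 0 ≤ c) :
    ∀ i : Nat, i < 5 → 5 ≤ ((pvSetCell t r c v).getD i []).length := by
  intro i hi
  have hrt : r.toNat < t.length := by omega
  rw [pvSetCell_eq t r c v hr0 hc0 (by omega)]
  rw [getD_set_row _ _ _ _ _ hrt]
  by_cases hir : r.toNat = i
  · rw [if_pos hir, List.length_set]
    exact hR r.toNat (by omega)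
  · rw [if_neg hir]
    exact hR i hi

lemma ne_of_pvCell_ne {u v : List (List Int)} (x y : Int)
    (h : pvCell u x y ≠ pvCell v x y) : u ≠ v := fun he => h (by rw [he])

def vstep (jogador_atual linha coluna : Int) (st : Bool × List (List Int)) (d : Int × Int) : Bool × List (List Int) :=
    let l_adj := linha + d.1
    let c_adj := coluna + d.2
    let l_oposto := linha + 2 * d.1
    let c_oposto := coluna + 2 * d.2
    if 0 ≤ l_adj ∧ l_adj < 5 ∧ 0 ≤ c_adj ∧ c_adj < 5 ∧ 0 ≤ l_oposto ∧ l_oposto < 5 ∧ 0 ≤ c_oposto ∧ c_oposto < 5 then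
      if pvCell st.2 l_adj c_adj != 0 && pvCell st.2 l_adj c_adj != jogador_atual &&
         pvCell st.2 l_oposto c_oposto == jogador_atual then
        if eh_casa_central l_adj c_adj then st
        else (true, pvSetCell st.2 l_adj c_adj 0)
      else st
    else st

lemma verificar_eq (t : List (List Int)) (l c j : Int) :
    verificar_e_realizar_capturas t l c j = pvDirs.foldl (vstep j l c) (false, t) := rfl

def trigP (v : List (List Int)) (p1 p2 j : Int) (e : Int × Int) : Prop :=
  (0 ≤ p1 + e.1 ∧ p1 + e.1 < 5 ∧ 0 ≤ p2 + e.2 ∧ p2 + e.2 < 5 ∧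
   0 ≤ p1 + 2 * e.1 ∧ p1 + 2 * e.1 < 5 ∧ 0 ≤ p2 + 2 * e.2 ∧ p2 + 2 * e.2 < 5) ∧
  pvCell v (p1 + e.1) (p2 + e.2) ≠ 0 ∧ pvCell v (p1 + e.1) (p2 + e.2) ≠ j ∧
  pvCell v (p1 + 2 * e.1) (p2 + 2 * e.2) = j ∧
  ¬(p1 + e.1 = 2 ∧ p2 + e.2 = 2)

lemma eh_casa_central_iff (l c : Int) : eh_casa_central l c = true ↔ (l = 2 ∧ c = 2) := by
  have h : PySem.Int.floordiv 5 2 = 2 := by decide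
  rw [eh_casa_central, h]
  simp

lemma dirs_two_ne : ∀ e ∈ pvDirs, ∀ e' ∈ pvDirs, ¬(2 * e'.1 = e.1 ∧ 2 * e'.2 = e.2) := by decide

lemma verif_go (v : List (List Int)) (p1 p2 j : Int) :
    ∀ ds : List (Int × Int), (∀ e ∈ ds, e ∈ pvDirs) → ds.Nodup →
    ∀ (u : List (List Int)) (b : Bool), 5 ≤ u.length →
    (∀ i : Nat, i < 5 → 5 ≤ (u.getD i []).length) →
    (∀ e ∈ ds,
      ((0 ≤ p1 + e.1 ∧ p1 + e.1 < 5 ∧ 0 ≤ p2 + e.2 ∧ p2 + e.2 < 5) →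
        pvCell u (p1 + e.1) (p2 + e.2) = pvCell v (p1 + e.1) (p2 + e.2)) ∧
      ((0 ≤ p1 + 2 * e.1 ∧ p1 + 2 * e.1 < 5 ∧ 0 ≤ p2 + 2 * e.2 ∧ p2 + 2 * e.2 < 5) →
        pvCell u (p1 + 2 * e.1) (p2 + 2 * e.2) = pvCell v (p1 + 2 * e.1) (p2 + 2 * e.2))) →
    ((ds.foldl (vstep j p1 p2) (b, u)).2 ≠ v ↔ (u ≠ v ∨ ∃ e ∈ ds, trigP v p1 p2 j e)) := by
  intro ds
  induction ds with
  | nil => intro _ _ u b _ _ _; simp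
  | cons e ds ih =>
    intro hsub hnd u b hu1 hu2 hagree
    have he : e ∈ pvDirs := hsub e (by simp)
    have hnd' : ds.Nodup := (List.nodup_cons.mp hnd).2
    have hens : e ∉ ds := (List.nodup_cons.mp hnd).1
    rw [List.foldl_cons]
    by_cases hbnd : (0 ≤ p1 + e.1 ∧ p1 + e.1 < 5 ∧ 0 ≤ p2 + e.2 ∧ p2 + e.2 < 5 ∧
        0 ≤ p1 + 2 * e.1 ∧ p1 + 2 * e.1 < 5 ∧ 0 ≤ p2 + 2 * e.2 ∧ p2 + 2 * e.2 < 5)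
    · have hadj := (hagree e (by simp)).1 (by tauto)
      have hopp := (hagree e (by simp)).2 (by tauto)
      by_cases hval : (pvCell v (p1 + e.1) (p2 + e.2) ≠ 0 ∧ pvCell v (p1 + e.1) (p2 + e.2) ≠ j ∧
          pvCell v (p1 + 2 * e.1) (p2 + 2 * e.2) = j)
      · by_cases hcen : (p1 + e.1 = 2 ∧ p2 + e.2 = 2)
        · -- central square: no write, no trigger
          have hstep : vstep j p1 p2 (b, u) e = (b, u) := by
            unfold vstep
            rw [if_pos hbnd]
            split
            · rw [if_pos ((eh_casa_central_iff _ _).mpr hcen)]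
            · rfl
          rw [hstep, ih (fun x hx => hsub x (by simp [hx])) hnd' u b hu1 hu2
              (fun x hx => hagree x (by simp [hx]))]
          constructor
          · rintro (h | h)
            · exact Or.inl h
            · exact Or.inr ⟨h.choose, by simp [h.choose_spec.1], h.choose_spec.2⟩
          · rintro (h | ⟨x, hx, hxt⟩)
            · exact Or.inl h
            · rcases List.mem_cons.mp hx with rfl | hx'
              · exact absurd hxt (by simp [trigP]; tauto)
              · exact Or.inr ⟨x, hx', hxt⟩
        · -- trigger: write happens
          have htrig : trigP v p1 p2 j e := ⟨hbnd, hval.1, hval.2.1, hval.2.2, hcen⟩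
          have hstep : vstep j p1 p2 (b, u) e =
              (true, pvSetCell u (p1 + e.1) (p2 + e.2) 0) := by
            unfold vstep
            rw [if_pos hbnd]
            have hb : (pvCell u (p1 + e.1) (p2 + e.2) != 0 &&
                pvCell u (p1 + e.1) (p2 + e.2) != j &&
                pvCell u (p1 + 2 * e.1) (p2 + 2 * e.2) == j) = true := by
              rw [hadj, hopp]
              simp only [bne_iff_ne, beq_iff_eq, Bool.and_eq_true]
              exact ⟨⟨hval.1, hval.2.1⟩, hval.2.2⟩
            rw [if_pos hb]
            rw [if_neg (by rw [eh_casa_central_iff]; exact hcen)]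
          rw [hstep]
          set u' := pvSetCell u (p1 + e.1) (p2 + e.2) 0 with hu'
          have hu'1 : 5 ≤ u'.length := by
            rw [hu', pvSetCell_len u _ _ _ (by omega) (by omega) (by omega)]
            exact hu1
          have hu'2 : ∀ i : Nat, i < 5 → 5 ≤ (u'.getD i []).length :=
            pvSetCell_rows u hu1 hu2 _ _ _ (by omega) (by omega) (by omega)
          have hagree' : ∀ x ∈ ds,
              ((0 ≤ p1 + x.1 ∧ p1 + x.1 < 5 ∧ 0 ≤ p2 + x.2 ∧ p2 + x.2 < 5) →
                pvCell u' (p1 + x.1) (p2 + x.2) = pvCell v (p1 + x.1) (p2 + x.2)) ∧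
              ((0 ≤ p1 + 2 * x.1 ∧ p1 + 2 * x.1 < 5 ∧ 0 ≤ p2 + 2 * x.2 ∧ p2 + 2 * x.2 < 5) →
                pvCell u' (p1 + 2 * x.1) (p2 + 2 * x.2) = pvCell v (p1 + 2 * x.1) (p2 + 2 * x.2)) := by
            intro x hx
            have hxd : x ∈ pvDirs := hsub x (by simp [hx])
            have hxe : x ≠ e := fun h => hens (h ▸ hx)
            constructor
            · intro hxb
              rw [hu', pvCell_pvSetCell u hu1 hu2 _ _ _ _ _ (by omega) (by omega) (by omega)
                  (by omega) (by tauto) (by tauto) (by tauto) (by tauto)]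
              rw [if_neg (by
                rintro ⟨h1, h2⟩
                apply hxe
                have : x.1 = e.1 := by omega
                have : x.2 = e.2 := by omega
                exact Prod.ext ‹x.1 = e.1› ‹x.2 = e.2›)]
              exact (hagree x (by simp [hx])).1 hxb
            · intro hxb
              rw [hu', pvCell_pvSetCell u hu1 hu2 _ _ _ _ _ (by omega) (by omega) (by omega)
                  (by omega) (by tauto) (by tauto) (by tauto) (by tauto)]
              rw [if_neg (by
                rintro ⟨h1, h2⟩
                exact dirs_two_ne e he x hxd ⟨by omega, by omega⟩)]
              exact (hagree x (by simp [hx])).2 hxb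
          have hne : u' ≠ v := by
            apply ne_of_pvCell_ne (p1 + e.1) (p2 + e.2)
            rw [hu', pvCell_pvSetCell u hu1 hu2 _ _ _ _ _ (by omega) (by omega) (by omega)
                (by omega) (by omega) (by omega) (by omega) (by omega)]
            rw [if_pos ⟨rfl, rfl⟩]
            exact fun h => hval.1 h.symm
          rw [ih (fun x hx => hsub x (by simp [hx])) hnd' u' true hu'1 hu'2 hagree']
          constructor
          · intro _; exact Or.inr ⟨e, by simp, htrig⟩
          · intro _; exact Or.inl hne
      · -- value condition fails: no write, no trigger
        have hstep : vstep j p1 p2 (b, u) e = (b, u) := by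
          unfold vstep
          rw [if_pos hbnd]
          have hb : (pvCell u (p1 + e.1) (p2 + e.2) != 0 &&
              pvCell u (p1 + e.1) (p2 + e.2) != j &&
              pvCell u (p1 + 2 * e.1) (p2 + 2 * e.2) == j) = false := by
            rw [hadj, hopp]
            simp only [Bool.and_eq_false_iff]
            by_cases h1 : pvCell v (p1 + e.1) (p2 + e.2) = 0
            · left; left; simpa using h1
            · by_cases h2 : pvCell v (p1 + e.1) (p2 + e.2) = j
              · left; right; simpa using h2
              · right
                exact beq_eq_false_iff_ne.mpr (fun h3 => hval ⟨h1, h2, h3⟩)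
          rw [hb, if_neg (by simp)]
        rw [hstep, ih (fun x hx => hsub x (by simp [hx])) hnd' u b hu1 hu2
            (fun x hx => hagree x (by simp [hx]))]
        constructor
        · rintro (h | ⟨x, hx, hxt⟩)
          · exact Or.inl h
          · exact Or.inr ⟨x, by simp [hx], hxt⟩
        · rintro (h | ⟨x, hx, hxt⟩)
          · exact Or.inl h
          · rcases List.mem_cons.mp hx with rfl | hx'
            · exact absurd hxt (fun ht => hval ⟨ht.2.1, ht.2.2.1, ht.2.2.2.1⟩)
            · exact Or.inr ⟨x, hx', hxt⟩
    · -- out of bounds: no write, no trigger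
      have hstep : vstep j p1 p2 (b, u) e = (b, u) := by
        unfold vstep
        rw [if_neg hbnd]
      rw [hstep, ih (fun x hx => hsub x (by simp [hx])) hnd' u b hu1 hu2
          (fun x hx => hagree x (by simp [hx]))]
      constructor
      · rintro (h | ⟨x, hx, hxt⟩)
        · exact Or.inl h
        · exact Or.inr ⟨x, by simp [hx], hxt⟩
      · rintro (h | ⟨x, hx, hxt⟩)
        · exact Or.inl h
        · rcases List.mem_cons.mp hx with rfl | hx'
          · exact absurd hxt (fun ht => hbnd ht.1)
          · exact Or.inr ⟨x, hx', hxt⟩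

lemma verif_characterize (v : List (List Int)) (p1 p2 j : Int)
    (hv1 : 5 ≤ v.length) (hv2 : ∀ i : Nat, i < 5 → 5 ≤ (v.getD i []).length) :
    ((verificar_e_realizar_capturas v p1 p2 j).2 ≠ v ↔ ∃ e ∈ pvDirs, trigP v p1 p2 j e) := by
  rw [verificar_eq]
  rw [verif_go v p1 p2 j pvDirs (fun x hx => hx) (by decide) v false hv1 hv2
      (fun x _ => ⟨fun _ => rfl, fun _ => rfl⟩)]
  simp

lemma realizar_len (t : List (List Int)) (hT : 5 ≤ t.length)
    (hR : ∀ i : Nat, i < 5 → 5 ≤ (t.getD i []).length)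
    (r c p1 p2 : Int) (hr : 0 ≤ r ∧ r < 5 ∧ 0 ≤ c ∧ c < 5) (hp : 0 ≤ p1 ∧ p1 < 5 ∧ 0 ≤ p2 ∧ p2 < 5) :
    5 ≤ (realizar_movimento t r c p1 p2).length ∧
    (∀ i : Nat, i < 5 → 5 ≤ ((realizar_movimento t r c p1 p2).getD i []).length) := by
  unfold realizar_movimento
  have h1 : (pvSetCell t p1 p2 (pvCell t r c)).length = t.length :=
    pvSetCell_len t _ _ _ (by omega) (by omega) (by omega)
  have h2 := pvSetCell_rows t hT hR p1 p2 (pvCell t r c) (by omega) (by omega) (by omega)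
  constructor
  · rw [pvSetCell_len _ _ _ _ (by omega) (by omega) (by omega)]
    omega
  · exact pvSetCell_rows _ (by omega) h2 r c 0 (by omega) (by omega) (by omega)

lemma cell_move (t : List (List Int)) (hT : 5 ≤ t.length)
    (hR : ∀ i : Nat, i < 5 → 5 ≤ (t.getD i []).length)
    (r c p1 p2 x y : Int)
    (hr : 0 ≤ r ∧ r < 5 ∧ 0 ≤ c ∧ c < 5) (hp : 0 ≤ p1 ∧ p1 < 5 ∧ 0 ≤ p2 ∧ p2 < 5)
    (hx : 0 ≤ x ∧ x < 5 ∧ 0 ≤ y ∧ y < 5) :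
    pvCell (realizar_movimento t r c p1 p2) x y =
      if x = r ∧ y = c then 0
      else if x = p1 ∧ y = p2 then pvCell t r c
      else pvCell t x y := by
  unfold realizar_movimento
  have h1 : (pvSetCell t p1 p2 (pvCell t r c)).length = t.length :=
    pvSetCell_len t _ _ _ (by omega) (by omega) (by omega)
  have h2 := pvSetCell_rows t hT hR p1 p2 (pvCell t r c) (by omega) (by omega) (by omega)
  rw [pvCell_pvSetCell _ (by omega) h2 _ _ _ _ _ (by omega) (by omega) (by omega) (by omega)
      (by omega) (by omega) (by omega) (by omega)]
  by_cases hoc : x = r ∧ y = c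
  · rw [if_pos hoc, if_pos hoc]
  · rw [if_neg hoc, if_neg hoc]
    rw [pvCell_pvSetCell t hT hR _ _ _ _ _ (by omega) (by omega) (by omega) (by omega)
        (by omega) (by omega) (by omega) (by omega)]

lemma dirs_two_neg_ne : ∀ e ∈ pvDirs, ∀ d ∈ pvDirs, ¬(2 * e.1 = -d.1 ∧ 2 * e.2 = -d.2) := by decide

lemma trig_iff (t : List (List Int)) (hT : 5 ≤ t.length)
    (hR : ∀ i : Nat, i < 5 → 5 ≤ (t.getD i []).length)
    (r c j : Int) (d : Int × Int) (hd : d ∈ pvDirs)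
    (hr : 0 ≤ r ∧ r < 5 ∧ 0 ≤ c ∧ c < 5)
    (hdst : 0 ≤ r + d.1 ∧ r + d.1 < 5 ∧ 0 ≤ c + d.2 ∧ c + d.2 < 5)
    (hj : pvCell t r c = j)
    (e : Int × Int) (he : e ∈ pvDirs) :
    trigP (realizar_movimento t r c (r + d.1) (c + d.2)) (r + d.1) (c + d.2) j e ↔
      ((0 ≤ r + d.1 + 2 * e.1 ∧ r + d.1 + 2 * e.1 < 5 ∧
        0 ≤ c + d.2 + 2 * e.2 ∧ c + d.2 + 2 * e.2 < 5) ∧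
       ¬(r + d.1 + e.1 = 2 ∧ c + d.2 + e.2 = 2) ∧
       pvCell t (r + d.1 + e.1) (c + d.2 + e.2) ≠ 0 ∧
       pvCell t (r + d.1 + e.1) (c + d.2 + e.2) ≠ j ∧
       pvCell t (r + d.1 + 2 * e.1) (c + d.2 + 2 * e.2) = j) := by
  have hde : (e.1 = -1 ∧ e.2 = 0) ∨ (e.1 = 1 ∧ e.2 = 0) ∨ (e.1 = 0 ∧ e.2 = -1) ∨ (e.1 = 0 ∧ e.2 = 1) := by
    simp [pvDirs] at he
    rcases he with h | h | h | h <;> [left; (right;left); (right;right;left); (right;right;right)] <;>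
      simp [Prod.ext_iff] at h <;> omega
  have hdd : (d.1 = -1 ∧ d.2 = 0) ∨ (d.1 = 1 ∧ d.2 = 0) ∨ (d.1 = 0 ∧ d.2 = -1) ∨ (d.1 = 0 ∧ d.2 = 1) := by
    simp [pvDirs] at hd
    rcases hd with h | h | h | h <;> [left; (right;left); (right;right;left); (right;right;right)] <;>
      simp [Prod.ext_iff] at h <;> omega
  by_cases hrev : e.1 = -d.1 ∧ e.2 = -d.2
  · -- adjacent cell is the vacated origin
    have hadj1 : r + d.1 + e.1 = r := by omega
    have hadj2 : c + d.2 + e.2 = c := by omega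
    constructor
    · rintro ⟨hb, h1, -⟩
      exfalso
      rw [cell_move t hT hR r c (r + d.1) (c + d.2) _ _ hr hdst (by omega)] at h1
      rw [if_pos ⟨hadj1, hadj2⟩] at h1
      exact h1 rfl
    · rintro ⟨-, -, -, h2, -⟩
      exfalso
      rw [hadj1, hadj2, hj] at h2
      exact h2 rfl
  · -- adjacent cell is untouched by the move
    have hane : ¬(r + d.1 + e.1 = r ∧ c + d.2 + e.2 = c) := fun h => hrev ⟨by omega, by omega⟩
    have hane' : ¬(r + d.1 + e.1 = r + d.1 ∧ c + d.2 + e.2 = c + d.2) := by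
      rintro ⟨h1, h2⟩; rcases hde with h | h | h | h <;> omega
    have hone : ¬(r + d.1 + 2 * e.1 = r ∧ c + d.2 + 2 * e.2 = c) := by
      rintro ⟨h1, h2⟩
      exact dirs_two_neg_ne e he d hd ⟨by omega, by omega⟩
    have hone' : ¬(r + d.1 + 2 * e.1 = r + d.1 ∧ c + d.2 + 2 * e.2 = c + d.2) := by
      rintro ⟨h1, h2⟩; rcases hde with h | h | h | h <;> omega
    constructor
    · rintro ⟨hb, h1, h2, h3, hc⟩
      rw [cell_move t hT hR r c (r + d.1) (c + d.2) _ _ hr hdst (by omega), if_neg hane,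
          if_neg hane'] at h1 h2
      rw [cell_move t hT hR r c (r + d.1) (c + d.2) _ _ hr hdst (by omega), if_neg hone,
          if_neg hone'] at h3
      exact ⟨by omega, hc, h1, h2, h3⟩
    · rintro ⟨hob, hc, h1, h2, h3⟩
      have hab : 0 ≤ r + d.1 + e.1 ∧ r + d.1 + e.1 < 5 ∧ 0 ≤ c + d.2 + e.2 ∧ c + d.2 + e.2 < 5 := by
        rcases hde with h | h | h | h <;> omega
      refine ⟨by omega, ?_, ?_, ?_, hc⟩
      · rw [cell_move t hT hR r c (r + d.1) (c + d.2) _ _ hr hdst (by omega), if_neg hane,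
            if_neg hane']
        exact h1
      · rw [cell_move t hT hR r c (r + d.1) (c + d.2) _ _ hr hdst (by omega), if_neg hane,
            if_neg hane']
        exact h2
      · rw [cell_move t hT hR r c (r + d.1) (c + d.2) _ _ hr hdst (by omega), if_neg hone,
            if_neg hone']
        exact h3

lemma any_congr_mem {α : Type} {l : List α} {f g : α → Bool} (h : ∀ a ∈ l, f a = g a) :
    l.any f = l.any g := by
  induction l with
  | nil => rfl
  | cons x xs ih =>
    simp only [List.any_cons, h x (by simp), ih (fun a ha => h a (by simp [ha]))]

lemma valid_eq (t : List (List Int)) (j r c : Int) (d : Int × Int) (hd : d ∈ pvDirs)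
    (hj : pvCell t r c = j) :
    eh_movimento_valido t r c (r + d.1) (c + d.2) j = (pvCell t (r + d.1) (c + d.2) == 0) := by
  have hdd : (d.1 = -1 ∧ d.2 = 0) ∨ (d.1 = 1 ∧ d.2 = 0) ∨ (d.1 = 0 ∧ d.2 = -1) ∨ (d.1 = 0 ∧ d.2 = 1) := by
    simp [pvDirs] at hd
    rcases hd with h | h | h | h <;> [left; (right;left); (right;right;left); (right;right;right)] <;>
      simp [Prod.ext_iff] at h <;> omega
  unfold eh_movimento_valido
  rw [hj, if_neg (by simp)]
  have hadj : ((r == r + d.1 && decide ((c - (c + d.2)).natAbs = 1)) ||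
      (c == c + d.2 && decide ((r - (r + d.1)).natAbs = 1))) = true := by
    simp only [beq_iff_eq, Bool.or_eq_true, Bool.and_eq_true, decide_eq_true_eq]
    omega
  by_cases hz : pvCell t (r + d.1) (c + d.2) = 0
  · rw [hz, if_neg (by simp), if_neg (by rw [hadj]; simp)]
    simp
  · rw [if_pos (by simpa using hz)]
    exact (beq_eq_false_iff_ne.mpr hz).symm

lemma bbody_iff (t : List (List Int)) (j p1 p2 : Int) (e : Int × Int) :
    (decide (0 ≤ p1 + 2 * e.1 ∧ p1 + 2 * e.1 < 5 ∧ 0 ≤ p2 + 2 * e.2 ∧ p2 + 2 * e.2 < 5) &&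
     !(p1 + e.1 == 2 && p2 + e.2 == 2) &&
     (pvCell t (p1 + e.1) (p2 + e.2) != 0 && pvCell t (p1 + e.1) (p2 + e.2) != j &&
      pvCell t (p1 + 2 * e.1) (p2 + 2 * e.2) == j)) = true ↔
    ((0 ≤ p1 + 2 * e.1 ∧ p1 + 2 * e.1 < 5 ∧ 0 ≤ p2 + 2 * e.2 ∧ p2 + 2 * e.2 < 5) ∧
     ¬(p1 + e.1 = 2 ∧ p2 + e.2 = 2) ∧
     pvCell t (p1 + e.1) (p2 + e.2) ≠ 0 ∧ pvCell t (p1 + e.1) (p2 + e.2) ≠ j ∧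
     pvCell t (p1 + 2 * e.1) (p2 + 2 * e.2) = j) := by
  simp only [Bool.and_eq_true, decide_eq_true_eq, bne_iff_ne, beq_iff_eq, Bool.not_eq_true',
    Bool.and_eq_false_iff, beq_eq_false_iff_ne]
  constructor
  · rintro ⟨⟨hb, hc⟩, ⟨h1, h2⟩, h3⟩
    exact ⟨hb, by tauto, h1, h2, h3⟩
  · rintro ⟨hb, hc, h1, h2, h3⟩
    exact ⟨⟨hb, by tauto⟩, ⟨h1, h2⟩, h3⟩

theorem main_eq (t : List (List Int)) (j : Int)
    (hT : 5 ≤ t.length) (hR : ∀ i : Nat, i < 5 → 5 ≤ (t.getD i []).length) :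
    existe_captura_possivel t j = existe_captura_possivel_alt t j := by
  unfold existe_captura_possivel existe_captura_possivel_alt
  have hm : PySem.Int.floordiv 5 2 = 2 := by decide
  rw [hm]
  have hrange : PySem.List.pyRange 0 5 1 = [0, 1, 2, 3, 4] := by decide
  rw [hrange]
  apply any_congr_mem; intro r hr
  apply any_congr_mem; intro c hc
  have hrb : 0 ≤ r ∧ r < 5 := by
    simp at hr; rcases hr with rfl | rfl | rfl | rfl | rfl <;> norm_num
  have hcb : 0 ≤ c ∧ c < 5 := by
    simp at hc; rcases hc with rfl | rfl | rfl | rfl | rfl <;> norm_num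
  by_cases hj : pvCell t r c = j
  · rw [if_pos (by simp [hj] : (pvCell t r c == j) = true),
        (by simp [hj] : (pvCell t r c == j) = true), Bool.true_and]
    apply any_congr_mem; intro d hd
    dsimp only
    by_cases hb : 0 ≤ r + d.1 ∧ r + d.1 < 5 ∧ 0 ≤ c + d.2 ∧ c + d.2 < 5
    · rw [if_pos hb, valid_eq t j r c d hd hj, (by simpa using hb : decide (0 ≤ r + d.1 ∧ r + d.1 < 5 ∧ 0 ≤ c + d.2 ∧ c + d.2 < 5) = true), Bool.true_and]
      by_cases hz : pvCell t (r + d.1) (c + d.2) = 0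
      · rw [(by simp [hz] : (pvCell t (r + d.1) (c + d.2) == 0) = true), if_pos rfl, Bool.true_and]
        have hlen := realizar_len t hT hR r c (r + d.1) (c + d.2) ⟨hrb.1, hrb.2, hcb.1, hcb.2⟩ hb
        rw [Bool.eq_iff_iff]
        rw [decide_eq_true_eq, List.any_eq_true]
        rw [verif_characterize _ _ _ _ hlen.1 hlen.2]
        constructor
        · rintro ⟨e, he, ht⟩
          refine ⟨e, he, ?_⟩
          rw [bbody_iff]
          exact (trig_iff t hT hR r c j d hd ⟨hrb.1, hrb.2, hcb.1, hcb.2⟩ hb hj e he).mp ht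
        · rintro ⟨e, he, hbdy⟩
          refine ⟨e, he, ?_⟩
          rw [bbody_iff] at hbdy
          exact (trig_iff t hT hR r c j d hd ⟨hrb.1, hrb.2, hcb.1, hcb.2⟩ hb hj e he).mpr hbdy
      · rw [(by simpa using hz : (pvCell t (r + d.1) (c + d.2) == 0) = false), if_neg (by simp)]
        simp
    · rw [if_neg hb, (by simpa using hb : decide (0 ≤ r + d.1 ∧ r + d.1 < 5 ∧ 0 ≤ c + d.2 ∧ c + d.2 < 5) = false)]
      simp
  · rw [if_neg (by simpa using hj), (by simpa using hj : (pvCell t r c == j) = false), Bool.false_and]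

-- ===== VERDICT (by name: the statement is the Claim_ definition above) =====
theorem existe_captura_possivel_spec : Claim_equal_existe_captura_possivel := by
  intro tabuleiro jogador_atual _ hPre
  exact main_eq tabuleiro jogador_atual hPre.1 hPre.2
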